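-- pv_equiv track=rewrite | github.com/ewaspring/catapillar | source/parser/tokenizer.py | _split_structural
-- ===== SOURCE A (Python) =====
-- from typing import List, Dict, Optional
--
-- STRUCTURAL_CHARS = set("[]|()")
--
-- COLON_CHARS = {":", "："}
--
-- def _split_structural(token: str) -> List[str]:
--     """
--     Split a single token at structural character boundaries.
--     E.g. "[1" → ["[", "1"], "映[" → ["映", "["], "key:" → ["key", ":"]
--     """
--     if not token:
--         return []
--     result = []
--     current = ""
--     for ch in token:
--         if ch in STRUCTURAL_CHARS or ch in COLON_CHARS:
--             if current:
--                 result.append(current)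
--                 current = ""
--             result.append(ch)
--         else:
--             current += ch
--     if current:
--         result.append(current)
--     return result
-- ===== SOURCE B (Python) =====
-- from typing import List
--
-- _SPECIAL = "[]|()\uff1a:"
--
-- def _split_structural(token: str) -> List[str]:
--     parts = []
--     i, n = 0, len(token)
--     while i < n:
--         if token[i] in _SPECIAL:
--             parts.append(token[i])
--             i += 1
--         else:
--             j = i
--             while j < n and token[j] not in _SPECIAL:
--                 j += 1
--             parts.append(token[i:j])
--             i = j
--     return parts
-- ===== Notes on version B (the rewrite author's own statement) =====
-- stated objective: alternative
-- what changed: Replaced the per-character accumulate-and-flush loop (building up a growing 'current' string, flushing it at each structural char and once more after the loop) by a two-pointer run scanner that emits each structural char directly and slices each maximal run of non-structural chars out of the token in one step, with no accumulator and no trailing flush.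
import Mathlib
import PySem

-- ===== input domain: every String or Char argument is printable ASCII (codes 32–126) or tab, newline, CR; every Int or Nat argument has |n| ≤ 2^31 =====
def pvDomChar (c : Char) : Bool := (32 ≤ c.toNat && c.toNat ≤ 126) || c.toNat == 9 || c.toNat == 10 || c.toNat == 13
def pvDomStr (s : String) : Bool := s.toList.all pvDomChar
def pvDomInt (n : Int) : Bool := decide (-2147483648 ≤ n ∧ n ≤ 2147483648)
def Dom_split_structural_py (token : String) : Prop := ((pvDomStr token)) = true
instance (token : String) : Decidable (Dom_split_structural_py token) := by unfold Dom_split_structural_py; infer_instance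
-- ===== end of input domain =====

-- B replaces A's per-char accumulate-and-flush loop by a two-pointer run scanner
-- that emits structural chars directly and slices maximal non-structural runs (alternative, same cost).


-- ===== PORT A =====
-- STRUCTURAL_CHARS = set("[]|()")
def pvStructuralChars : PySem.Set Char := PySem.Set.ofList ['[', ']', '|', '(', ')']
-- COLON_CHARS = {":", "："}
def pvColonChars : PySem.Set Char := PySem.Set.ofList [':', '：']

-- loop body: for ch in token
def pvAStep (st : List String × List Char) (ch : Char) : List String × List Char :=
  if ch ∈ pvStructuralChars ∨ ch ∈ pvColonChars then
    (if st.2 ≠ [] then st.1 ++ [String.ofList st.2] ++ [String.ofList [ch]]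
     else st.1 ++ [String.ofList [ch]], [])
  else (st.1, st.2 ++ [ch])

-- 'if current: result.append(current)' after the loop
def pvAFinish (st : List String × List Char) : List String :=
  if st.2 ≠ [] then st.1 ++ [String.ofList st.2] else st.1

def split_structural_py (token : String) : List String :=
  if token = "" then []
  else pvAFinish (token.toList.foldl pvAStep ([], []))

-- ===== PORT B =====
-- _SPECIAL = "[]|()：:" ; token[i] in _SPECIAL
def pvIsSpec (c : Char) : Bool := decide (c ∈ ['[', ']', '|', '(', ')', '：', ':'])

-- the outer while loop over positions; the inner while scans the maximal non-special run (take/drop)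
def pvBGo : List Char → List String
  | [] => []
  | c :: rest =>
    if pvIsSpec c then String.ofList [c] :: pvBGo rest
    else String.ofList (c :: rest.takeWhile (fun x => !pvIsSpec x)) ::
         pvBGo (rest.dropWhile (fun x => !pvIsSpec x))
termination_by l => l.length
decreasing_by
  · simp
  · simpa using Nat.lt_succ_of_le (List.length_dropWhile_le _ _)

def split_structural_py_alt (token : String) : List String := pvBGo token.toList

-- ===== PRECONDITION & SPEC =====
def Spec_split_structural_py (token : String) (out : List String) : Prop := out = split_structural_py_alt token
instance (token : String) (out : List String) : Decidable (Spec_split_structural_py token out) := by unfold Spec_split_structural_py; infer_instance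

-- ===== CLAIM (what is proved, stated in full; the proofs are below) =====
def Claim_equal_split_structural_py : Prop := ∀ (token : String), Dom_split_structural_py token → Spec_split_structural_py token (split_structural_py token)

-- ===== LEMMAS AND PROOFS =====

-- the two membership tests agree
theorem pv_spec_iff (c : Char) :
    (c ∈ pvStructuralChars ∨ c ∈ pvColonChars) ↔ pvIsSpec c = true := by
  simp [pvStructuralChars, pvColonChars, pvIsSpec, PySem.Set.mem_ofList]
  tauto

-- take/drop of a non-special run followed by a special char
theorem pv_tw (t : List Char) (ch : Char) (rest : List Char)
    (h : ∀ c ∈ t, pvIsSpec c = false) (hch : pvIsSpec ch = true) :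
    (t ++ ch :: rest).takeWhile (fun x => !pvIsSpec x) = t ∧
    (t ++ ch :: rest).dropWhile (fun x => !pvIsSpec x) = ch :: rest := by
  induction t with
  | nil => simp [hch]
  | cons a t ih =>
    have ha := h a (by simp)
    have := ih (fun c hc => h c (by simp [hc]))
    simp [ha, this.1, this.2]

-- main invariant: A's loop + final flush from state (res, cur), cur non-special,
-- equals res ++ B's run scan of cur ++ cs
theorem pv_loop_eq (cs : List Char) : ∀ (res : List String) (cur : List Char),
    (∀ c ∈ cur, pvIsSpec c = false) →
    pvAFinish (cs.foldl pvAStep (res, cur)) = res ++ pvBGo (cur ++ cs) := by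
  induction cs with
  | nil =>
    intro res cur h
    match cur with
    | [] => simp [pvAFinish, pvBGo]
    | c :: t =>
      have hc := h c (by simp)
      have ht : t.takeWhile (fun x => !pvIsSpec x) = t :=
        List.takeWhile_eq_self_iff.mpr (by intro x hx; simp [h x (by simp [hx])])
      have hd : t.dropWhile (fun x => !pvIsSpec x) = [] :=
        List.dropWhile_eq_nil_iff.mpr (by intro x hx; simp [h x (by simp [hx])])
      simp [pvAFinish, pvBGo, hc, ht, hd]
  | cons ch cs ih =>
    intro res cur h
    by_cases hs : pvIsSpec ch = true
    · have hstep : pvAStep (res, cur) ch =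
          (if cur ≠ [] then res ++ [String.ofList cur] ++ [String.ofList [ch]]
           else res ++ [String.ofList [ch]], []) := by
        simp only [pvAStep]
        rw [if_pos ((pv_spec_iff ch).mpr hs)]
      match cur with
      | [] =>
        simp only [List.foldl_cons, hstep]
        rw [ih _ [] (by intro c hc; cases hc)]
        simp [pvBGo, hs]
      | c :: t =>
        have hc := h c (by simp)
        have hall : ∀ x ∈ t, pvIsSpec x = false := fun x hx => h x (by simp [hx])
        obtain ⟨htw, hdw⟩ := pv_tw t ch cs hall hs
        simp only [List.foldl_cons, hstep]
        rw [if_pos (by simp), ih _ [] (by intro c hc; cases hc)]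
        rw [List.cons_append]
        simp [pvBGo, hc, hs, htw, hdw]
    · have hns : pvIsSpec ch = false := by simpa using hs
      have hstep : pvAStep (res, cur) ch = (res, cur ++ [ch]) := by
        simp only [pvAStep]
        rw [if_neg (by rw [pv_spec_iff, hns]; simp)]
      simp only [List.foldl_cons, hstep]
      rw [ih res (cur ++ [ch]) (by intro c hc; rcases List.mem_append.mp hc with h1 | h1
                                   · exact h c h1
                                   · simp at h1; subst h1; exact hns)]
      simp

-- ===== VERDICT (by name: the statement is the Claim_ definition above) =====
theorem split_structural_py_spec : Claim_equal_split_structural_py := by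
  intro token _
  unfold Spec_split_structural_py split_structural_py split_structural_py_alt
  by_cases h : token = ""
  · subst h; simp [pvBGo]
  · rw [if_neg h]
    simpa using pv_loop_eq token.toList [] [] (by intro c hc; cases hc)
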